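-- pv_equiv track=rewrite | github.com/muntakabasit/flow | tools/generate_accent_test_pack.py | mutate_cluster_reduction
-- ===== SOURCE A (Python) =====
-- def mutate_cluster_reduction(text: str) -> str:
--     replacements = {
--         "asked": "ask",
--         "helped": "help",
--         "worked": "work",
--         "found": "foun",
--         "first": "firs",
--         "next": "nex",
--     }
--     out = text
--     for old, new in replacements.items():
--         out = out.replace(old, new).replace(old.capitalize(), new.capitalize())
--     return out
-- ===== SOURCE B (Python) =====
-- def mutate_cluster_reduction(text: str) -> str:
--     # Single left-to-right pass over the text with a table of all 12 literals
--     # (each lowercase key and its capitalized form); at each position the first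
--     # matching literal is replaced and the scan continues after the replacement.
--     pairs = []
--     for old, new in [("asked", "ask"), ("helped", "help"), ("worked", "work"),
--                      ("found", "foun"), ("first", "firs"), ("next", "nex")]:
--         pairs.append((old, new))
--         pairs.append((old.capitalize(), new.capitalize()))
--     out = []
--     i = 0
--     n = len(text)
--     while i < n:
--         for old, new in pairs:
--             if text.startswith(old, i):
--                 out.append(new)
--                 i += len(old)
--                 break
--         else:
--             out.append(text[i])
--             i += 1
--     return "".join(out)
-- ===== Notes on version B (the rewrite author's own statement) =====
-- stated objective: alternative
-- what changed: Replaces A's six sequential full-text replace passes (twelve scans, one per literal and its capitalized form) with a single table-driven left-to-right scan that at each position replaces the first matching literal and continues after it.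
-- intended difference: On texts containing 'foundext' or 'Foundext', A's found->foun pass creates a new 'next' occurrence that its later next->nex pass also rewrites (A('foundext') = 'founex'), while B replaces each original occurrence exactly once and returns 'founext', the intended independent-replacement result. — e.g. on mutate_cluster_reduction("foundext"): A returns "founex", B returns "founext"
import Mathlib
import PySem

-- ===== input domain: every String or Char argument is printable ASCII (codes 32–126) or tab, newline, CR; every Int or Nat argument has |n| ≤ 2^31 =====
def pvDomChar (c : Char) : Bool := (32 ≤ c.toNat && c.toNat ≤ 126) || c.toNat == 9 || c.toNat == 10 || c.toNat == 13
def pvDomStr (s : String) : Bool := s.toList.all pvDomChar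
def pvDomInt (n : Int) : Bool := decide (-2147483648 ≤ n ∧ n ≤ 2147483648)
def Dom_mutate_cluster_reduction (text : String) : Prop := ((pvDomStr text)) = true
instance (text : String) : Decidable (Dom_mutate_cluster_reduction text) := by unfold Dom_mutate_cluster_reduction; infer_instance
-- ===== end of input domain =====

-- B replaces A's six sequential full-text replace passes (twelve scans) by one
-- table-driven left-to-right scan; on texts containing "foundext"/"Foundext" A's
-- chained replacement is replaced by B's independent one (see D_ below).

-- ===== PORT A =====
-- str.capitalize(): first char upper-cased, the rest lower-cased (exact on ASCII)
def pvCapitalize (s : String) : String :=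
  String.ofList (match s.toList with
    | [] => []
    | c :: t => PySem.Chars.upperChar c :: t.map PySem.Chars.lowerChar)

def mutate_cluster_reduction (text : String) : String :=
  let replacements : PySem.Dict String String :=
    PySem.Dict.ofList [("asked", "ask"), ("helped", "help"), ("worked", "work"),
                       ("found", "foun"), ("first", "firs"), ("next", "nex")]
  replacements.items.foldl
    (fun out p =>
      PySem.Str.replace (PySem.Str.replace out p.1 p.2) (pvCapitalize p.1) (pvCapitalize p.2))
    text

-- ===== PORT B =====
-- the table of twelve literals: each lowercase key and its capitalized form
def pvPairs : List (List Char × List Char) :=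
  [("asked", "ask"), ("helped", "help"), ("worked", "work"),
   ("found", "foun"), ("first", "firs"), ("next", "nex")].foldl
    (fun acc p =>
      acc ++ [(p.1.toList, p.2.toList),
              ((pvCapitalize p.1).toList, (pvCapitalize p.2).toList)]) []

-- the while-loop of Source B: `skip` counts characters still to be jumped over after a
-- replacement (Source B advances its index by len(old)); at skip = 0 the first matching
-- literal of the table is replaced, otherwise the character is copied
def pvScanGo : List Char → Nat → List Char
  | [], _ => []
  | _ :: t, skip + 1 => pvScanGo t skip
  | c :: t, 0 =>
    match pvPairs.find? (fun p => p.1.isPrefixOf (c :: t)) with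
    | some (k, v) => v ++ pvScanGo t (k.length - 1)
    | none => c :: pvScanGo t 0

def mutate_cluster_reduction_alt (text : String) : String :=
  String.ofList (pvScanGo text.toList 0)

-- ===== PRECONDITION & SPEC =====
-- On texts containing "foundext" or "Foundext", A's found→foun pass creates a new
-- "next" occurrence which its later next→nex pass also rewrites (A "foundext" =
-- "founex"); B replaces each original occurrence exactly once and returns
-- "founext", the intended independent-replacement result.
def D_mutate_cluster_reduction (text : String) : Prop :=
  PySem.Str.isIn "foundext" text = true ∨ PySem.Str.isIn "Foundext" text = true
instance (text : String) : Decidable (D_mutate_cluster_reduction text) := by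
  unfold D_mutate_cluster_reduction; infer_instance

def Spec_mutate_cluster_reduction (text : String) (out : String) : Prop :=
  ¬ D_mutate_cluster_reduction text → out = mutate_cluster_reduction_alt text
instance (text : String) (out : String) : Decidable (Spec_mutate_cluster_reduction text out) := by
  unfold Spec_mutate_cluster_reduction; infer_instance

def pvDiffWitness_mutate_cluster_reduction : String := "foundext"
def pvDiffWitnessOut_mutate_cluster_reduction : String × String := ("founex", "founext")

-- ===== CLAIM =====
def Claim_unchanged_mutate_cluster_reduction : Prop :=
  ∀ (text : String), Dom_mutate_cluster_reduction text →
    Spec_mutate_cluster_reduction text (mutate_cluster_reduction text)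
def Claim_changed_mutate_cluster_reduction : Prop :=
  Dom_mutate_cluster_reduction (pvDiffWitness_mutate_cluster_reduction) ∧
  D_mutate_cluster_reduction (pvDiffWitness_mutate_cluster_reduction) ∧
  mutate_cluster_reduction (pvDiffWitness_mutate_cluster_reduction) = pvDiffWitnessOut_mutate_cluster_reduction.1 ∧
  mutate_cluster_reduction_alt (pvDiffWitness_mutate_cluster_reduction) = pvDiffWitnessOut_mutate_cluster_reduction.2 ∧
  pvDiffWitnessOut_mutate_cluster_reduction.1 ≠ pvDiffWitnessOut_mutate_cluster_reduction.2
def Claim_exact_mutate_cluster_reduction : Prop :=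
  ∀ (text : String), Dom_mutate_cluster_reduction text →
    D_mutate_cluster_reduction text →
    mutate_cluster_reduction text ≠ mutate_cluster_reduction_alt text

-- ===== LEMMAS AND PROOFS =====

-- single replace pass, structurally: if the key is a prefix, emit the value and
-- skip the key, else copy one character
def pvRepl1 (old new : List Char) : List Char → List Char
  | [] => []
  | c :: t =>
    if old.isPrefixOf (c :: t) then new ++ pvRepl1 old new (t.drop (old.length - 1))
    else c :: pvRepl1 old new t
termination_by s => s.length
decreasing_by
  · simp
  · simp

lemma pvRepl1_nil (old new : List Char) : pvRepl1 old new [] = [] := by rw [pvRepl1]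

lemma pvRepl1_cons_neg (old new : List Char) (c : Char) (t : List Char)
    (h : ¬ old <+: (c :: t)) :
    pvRepl1 old new (c :: t) = c :: pvRepl1 old new t := by
  rw [pvRepl1, if_neg (by simpa [List.isPrefixOf_iff_prefix] using h)]

lemma pvRepl1_match (old new t : List Char) (h : old ≠ []) :
    pvRepl1 old new (old ++ t) = new ++ pvRepl1 old new t := by
  obtain ⟨c, o', rfl⟩ := List.exists_cons_of_ne_nil h
  rw [show (c :: o') ++ t = c :: (o' ++ t) by simp, pvRepl1,
    if_pos (by simp [List.isPrefixOf_iff_prefix])]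
  simp

-- bridge: PySem's replace with a nonempty key is pvRepl1
lemma pvReplaceGo_eq (old new : List Char) (h : old ≠ []) :
    ∀ fuel l acc, l.length ≤ fuel →
      PySem.Chars.replace.go old new fuel l acc = acc.reverse ++ pvRepl1 old new l := by
  intro fuel
  induction fuel with
  | zero =>
      intro l acc hl
      interval_cases hll : l.length
      · rw [List.length_eq_zero_iff] at hll; subst hll
        rw [PySem.Chars.replace.go]; simp [pvRepl1_nil]
  | succ n ih =>
      intro l acc hl
      match l with
      | [] =>
          rw [PySem.Chars.replace.go]
          · simp [pvRepl1_nil]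
          · omega
      | c :: t =>
          rw [PySem.Chars.replace.go]
          by_cases hp : old.isPrefixOf (c :: t)
          · rw [if_pos hp, pvRepl1, if_pos hp]
            have hdrop : (c :: t).drop old.length = t.drop (old.length - 1) := by
              obtain ⟨d, o', rfl⟩ := List.exists_cons_of_ne_nil h
              simp
            rw [hdrop, ih _ _ (by simp at hl ⊢; omega)]
            simp
          · rw [if_neg hp, pvRepl1, if_neg hp, ih _ _ (by simp at hl ⊢; omega)]
            simp

lemma pvReplace_eq (s old new : List Char) (h : old ≠ []) :
    PySem.Chars.replace s old new = pvRepl1 old new s := by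
  rw [PySem.Chars.replace, if_neg (by simpa using h)]
  simpa using pvReplaceGo_eq old new h s.length s [] le_rfl

-- the chain of passes, as A performs them
def pvChain (P : List (List Char × List Char)) (s : List Char) : List Char :=
  P.foldl (fun s p => pvRepl1 p.1 p.2 s) s

lemma pvChain_nil_pass (s : List Char) : pvChain [] s = s := rfl

lemma pvChain_cons (p : List Char × List Char) (P : List (List Char × List Char)) (s : List Char) :
    pvChain (p :: P) s = pvChain P (pvRepl1 p.1 p.2 s) := rfl

lemma pvChain_append (P Q : List (List Char × List Char)) (s : List Char) :
    pvChain (P ++ Q) s = pvChain Q (pvChain P s) := by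
  simp [pvChain, List.foldl_append]

lemma pvChain_nil (P : List (List Char × List Char)) : pvChain P [] = [] := by
  induction P with
  | nil => rfl
  | cons p P ih => rw [pvChain_cons, pvRepl1_nil, ih]

-- key/value shape conditions of every pass of the table, bundled decidably
def pvHeads : List Char := ['a', 'h', 'w', 'f', 'n', 'A', 'H', 'W', 'F', 'N']

def pvValidB (p : List Char × List Char) : Bool :=
  4 ≤ p.1.length && p.1.length ≤ 6 && 3 ≤ p.2.length && p.2.isPrefixOf p.1 &&
  p.1.headD ' ' ∈ pvHeads && (p.1.tail.take 2).all (fun c => !(c ∈ pvHeads))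

lemma pvTake_eq_of_prefix {l₁ l₂ : List Char} (h : l₁ <+: l₂) {n : Nat} (hn : n ≤ l₁.length) :
    l₂.take n = l₁.take n := by
  obtain ⟨r, rfl⟩ := h
  exact List.take_append_of_le_length hn

-- one pass preserves any take n with n ≤ |new|, because the value is a prefix of the key
lemma pvRepl1_take (old new : List Char) (hpre : new <+: old) :
    ∀ (s : List Char) (n : Nat), n ≤ new.length →
      (pvRepl1 old new s).take n = s.take n := by
  intro s
  induction s with
  | nil => intro n _; rw [pvRepl1_nil]
  | cons c t ih =>
      intro n hn
      cases n with
      | zero => simp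
      | succ m =>
          by_cases hp : old <+: (c :: t)
          · have hold : old ≠ [] := by
              rintro rfl
              have : new = [] := List.prefix_nil.mp hpre
              simp [this] at hn
            obtain ⟨t', ht'⟩ := hp
            rw [← ht', pvRepl1_match old new t' hold,
              List.take_append_of_le_length hn,
              pvTake_eq_of_prefix (List.prefix_append old t') (hn.trans hpre.length_le),
              pvTake_eq_of_prefix hpre hn]
          · rw [pvRepl1_cons_neg old new c t hp]
            simp only [List.take_succ_cons]
            rw [ih m (by omega)]

-- take (n+3) is preserved when the key matches nowhere in the first n positions
lemma pvRepl1_genTake (old new : List Char) (hpre : new <+: old) (h3 : 3 ≤ new.length) :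
    ∀ (s : List Char) (n : Nat), (∀ p < n, ¬ old <+: s.drop p) →
      (pvRepl1 old new s).take (n + 3) = s.take (n + 3) := by
  intro s
  induction s with
  | nil => intro n _; rw [pvRepl1_nil]
  | cons c t ih =>
      intro n hn
      by_cases hp : old <+: (c :: t)
      · have : n = 0 := by
          by_contra h
          exact hn 0 (by omega) (by simpa using hp)
        subst this
        exact pvRepl1_take old new hpre (c :: t) 3 h3
      · rw [pvRepl1_cons_neg old new c t hp]
        cases n with
        | zero =>
            simp only [List.take_succ_cons]
            rw [pvRepl1_take old new hpre t 2 (by omega)]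
        | succ m =>
            have h4 : m + 1 + 3 = (m + 3) + 1 := by omega
            rw [h4]
            simp only [List.take_succ_cons]
            rw [ih m (fun p hp' => by simpa using hn (p + 1) (by omega))]

lemma pvValidB_spec (p : List Char × List Char) (h : pvValidB p = true) :
    4 ≤ p.1.length ∧ p.1.length ≤ 6 ∧ 3 ≤ p.2.length ∧ p.2 <+: p.1 ∧
      p.1.headD ' ' ∈ pvHeads ∧ (∀ c ∈ p.1.tail.take 2, c ∉ pvHeads) := by
  simp [pvValidB, List.isPrefixOf_iff_prefix] at h
  simp only [List.headD_eq_head?_getD]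
  tauto

lemma pvChain_take3 (P : List (List Char × List Char))
    (hv : ∀ p ∈ P, pvValidB p = true) :
    ∀ (s : List Char) (n : Nat), n ≤ 3 → (pvChain P s).take n = s.take n := by
  induction P with
  | nil => intro s n _; rfl
  | cons p P ih =>
      intro s n hn
      obtain ⟨_, _, h3, hpre, _, _⟩ := pvValidB_spec p (hv p (by simp))
      rw [pvChain_cons, ih (fun q hq => hv q (by simp [hq])) _ n hn,
        pvRepl1_take p.1 p.2 hpre s n (by omega)]

-- a nonempty prefix pins down the head
lemma pvHead_of_prefix {old l : List Char} (h : old <+: l) (hne : old ≠ []) :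
    l.headD ' ' = old.headD ' ' := by
  obtain ⟨c, o', rfl⟩ := List.exists_cons_of_ne_nil hne
  obtain ⟨r, rfl⟩ := h
  rfl

-- take 5 is preserved by the whole chain when the first two characters of s are
-- not the head of any key
lemma pvChain_take5 (P : List (List Char × List Char))
    (hv : ∀ p ∈ P, pvValidB p = true) :
    ∀ (s : List Char), (∀ c ∈ s.take 2, c ∉ pvHeads) →
      (pvChain P s).take 5 = s.take 5 := by
  induction P with
  | nil => intro s _; rfl
  | cons p P ih =>
      intro s hs
      obtain ⟨h4, h6, h3, hpre, hhd, _⟩ := pvValidB_spec p (hv p (by simp))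
      have hne : p.1 ≠ [] := by intro h; rw [h] at h4; exact absurd h4 (by decide)
      have hstep : (pvRepl1 p.1 p.2 s).take 5 = s.take 5 := by
        have h25 : (2 : Nat) + 3 = 5 := rfl
        rw [← h25]
        apply pvRepl1_genTake p.1 p.2 hpre (by omega) s 2
        intro q hq hcon
        have hhead : (s.drop q).headD ' ' = p.1.headD ' ' := pvHead_of_prefix hcon hne
        have hqlt : q < s.length := by
          by_contra hcon2
          rw [List.drop_eq_nil_of_le (by omega)] at hcon
          exact hne (List.prefix_nil.mp hcon)
        have hmem : s[q]'hqlt ∈ s.take 2 := by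
          rw [List.mem_take_iff_getElem]
          exact ⟨q, by omega, by simp⟩
        apply hs _ hmem
        have hdg : (s.drop q).headD ' ' = s[q]'hqlt := by
          rw [List.headD_eq_head?_getD, List.head?_drop, List.getElem?_eq_getElem hqlt]
          rfl
        rw [← hdg, hhead]
        exact hhd
      have hC2 : ∀ c ∈ (pvRepl1 p.1 p.2 s).take 2, c ∉ pvHeads := by
        intro c hc
        apply hs
        rwa [pvRepl1_take p.1 p.2 hpre s 2 (by omega)] at hc
      rw [pvChain_cons, ih (fun q hq => hv q (by simp [hq])) (pvRepl1 p.1 p.2 s) hC2, hstep]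

-- decidable over-approximation of "old can match starting inside w ++ (anything)"
def pvMayMatch (old w : List Char) : Bool :=
  if old.length ≤ w.length then old.isPrefixOf w else w.isPrefixOf old

lemma pvMayMatch_of_prefix {old w t : List Char} (h : old <+: w ++ t) :
    pvMayMatch old w = true := by
  unfold pvMayMatch
  split
  · rename_i hle
    rw [List.isPrefixOf_iff_prefix]
    have h1 : old = (w ++ t).take old.length := List.prefix_iff_eq_take.mp h
    rw [List.take_append_of_le_length hle] at h1
    exact h1 ▸ List.take_prefix _ _
  · rename_i hgt
    rw [List.isPrefixOf_iff_prefix]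
    have h1 : old = (w ++ t).take old.length := List.prefix_iff_eq_take.mp h
    have h2 := congrArg (List.take w.length) h1
    rw [List.take_take, min_eq_left (by omega), List.take_left] at h2
    have := List.take_prefix w.length old
    rwa [h2] at this

def pvPassOK (w : List Char) (p : List Char × List Char) : Bool :=
  (List.range w.length).all (fun q => !pvMayMatch p.1 (w.drop q))

-- one pass walks over a block w in which its key can match nowhere
lemma pvRepl1_block (old new : List Char) :
    ∀ (w t : List Char), (∀ q < w.length, ¬ old <+: (w.drop q ++ t)) →
      pvRepl1 old new (w ++ t) = w ++ pvRepl1 old new t := by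
  intro w
  induction w with
  | nil => intro t _; rfl
  | cons c w' ih =>
      intro t h
      rw [List.cons_append, pvRepl1_cons_neg old new c (w' ++ t)
        (by simpa using h 0 (by simp)),
        ih t (fun q hq => by simpa using h (q + 1) (by simpa using Nat.succ_lt_succ hq))]
      simp

lemma pvRepl1_blockOK (old new w t : List Char) (h : pvPassOK w (old, new) = true) :
    pvRepl1 old new (w ++ t) = w ++ pvRepl1 old new t := by
  apply pvRepl1_block
  intro q hq hcon
  have hmm := pvMayMatch_of_prefix hcon
  simp only [pvPassOK, List.all_eq_true, List.mem_range] at h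
  have := h q hq
  simp at this
  rw [hmm] at this
  exact absurd this (by simp)

-- no key of the table occurs at the head of c :: (chain of earlier passes on t)
-- unless it occurs at the head of c :: t itself
lemma pvNoCreate (P : List (List Char × List Char)) (p : List Char × List Char)
    (hvP : ∀ q ∈ P, pvValidB q = true) (hvp : pvValidB p = true)
    (c : Char) (t : List Char) (hp : ¬ p.1 <+: c :: t) :
    ¬ p.1 <+: c :: pvChain P t := by
  intro hcon
  obtain ⟨h4, h6, h3, hpre, hhd, htl⟩ := pvValidB_spec p hvp
  obtain ⟨d, tl, hdl⟩ := List.exists_cons_of_ne_nil (show p.1 ≠ [] by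
    intro h; rw [h] at h4; exact absurd h4 (by decide))
  rw [hdl, List.cons_prefix_cons] at hcon
  obtain ⟨rfl, htlu⟩ := hcon
  set u := pvChain P t with hu
  -- tl is the take of u of its length, and that take is preserved back to t
  have hL3 : 3 ≤ tl.length := by rw [hdl] at h4; simp at h4; omega
  have hL5 : tl.length ≤ 5 := by rw [hdl] at h6; simp at h6; omega
  have htake : tl = u.take tl.length := List.prefix_iff_eq_take.mp htlu
  have hu3 : u.take 3 = t.take 3 := pvChain_take3 P hvP t 3 le_rfl
  have hu2 : u.take 2 = t.take 2 := pvChain_take3 P hvP t 2 (by omega)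
  -- the first two characters of t are the first two of tl, hence not key heads
  have hC2 : ∀ ch ∈ t.take 2, ch ∉ pvHeads := by
    intro ch hch
    apply htl
    rw [hdl]
    simp only [List.tail_cons]
    have h1 : tl.take 2 = t.take 2 := by
      rw [htake, List.take_take, min_eq_left (by omega), hu2]
    rwa [h1]
  have hu5 : u.take 5 = t.take 5 := pvChain_take5 P hvP t hC2
  have htlt : List.take tl.length u = List.take tl.length t := by
    calc List.take tl.length u
        = List.take tl.length (List.take 5 u) := by rw [List.take_take, min_eq_left hL5]
      _ = List.take tl.length (List.take 5 t) := by rw [hu5]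
      _ = List.take tl.length t := by rw [List.take_take, min_eq_left hL5]
  have htl_t : tl = t.take tl.length := htake.trans htlt
  apply hp
  rw [hdl, List.cons_prefix_cons]
  exact ⟨rfl, htl_t ▸ List.take_prefix _ _⟩

-- when no key of the table matches at the head, the whole chain copies the head
lemma pvChain_cons_noMatch (P : List (List Char × List Char))
    (hv : ∀ p ∈ P, pvValidB p = true)
    (c : Char) (t : List Char) (H : ∀ p ∈ P, ¬ p.1 <+: c :: t) :
    pvChain P (c :: t) = c :: pvChain P t := by
  induction P using List.reverseRecOn with
  | nil => rfl
  | append_singleton P' p ih =>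
      have hvP' : ∀ q ∈ P', pvValidB q = true := fun q hq => hv q (by simp [hq])
      rw [pvChain_append, pvChain_append,
        ih hvP' (fun q hq => H q (by simp [hq])),
        pvChain_cons, pvChain_cons, pvChain_nil_pass, pvChain_nil_pass,
        pvRepl1_cons_neg p.1 p.2 c (pvChain P' t)
          (pvNoCreate P' p hvP' (hv p (by simp)) c t (H p (by simp)))]

def pvTable : List (List Char × List Char) := [("asked".toList, "ask".toList), ("Asked".toList, "Ask".toList), ("helped".toList, "help".toList), ("Helped".toList, "Help".toList), ("worked".toList, "work".toList), ("Worked".toList, "Work".toList), ("found".toList, "foun".toList), ("Found".toList, "Foun".toList), ("first".toList, "firs".toList), ("First".toList, "Firs".toList), ("next".toList, "nex".toList), ("Next".toList, "Nex".toList)]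

lemma pvPairs_eq_table : pvPairs = pvTable := by decide

lemma pvTable_valid : ∀ p ∈ pvTable, pvValidB p = true := by decide

-- the next→nex pass walks over a produced "foun"/"Foun" block unless the text
-- goes on with "ext" (the excluded D_ inputs)
lemma pvNextStep (w Z t : List Char) (hw : w = "foun".toList ∨ w = "Foun".toList)
    (hZ : Z.take 3 = t.take 3) (hext : ¬ ("ext".toList <+: t)) :
    pvRepl1 "next".toList "nex".toList (w ++ Z) = w ++ pvRepl1 "next".toList "nex".toList Z := by
  apply pvRepl1_block
  intro q hq hcon
  have hq4 : q < 4 := by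
    rcases hw with rfl | rfl <;> simpa using hq
  interval_cases q
  · rcases hw with rfl | rfl <;> exact absurd (pvMayMatch_of_prefix hcon) (by decide)
  · rcases hw with rfl | rfl <;> exact absurd (pvMayMatch_of_prefix hcon) (by decide)
  · rcases hw with rfl | rfl <;> exact absurd (pvMayMatch_of_prefix hcon) (by decide)
  · apply hext
    have hdrop : w.drop 3 = ['n'] := by rcases hw with rfl | rfl <;> decide
    rw [hdrop] at hcon
    rw [show "next".toList = 'n' :: "ext".toList from rfl,
      show (['n'] ++ Z) = 'n' :: Z from rfl, List.cons_prefix_cons] at hcon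
    have h1 : "ext".toList = Z.take 3 := List.prefix_iff_eq_take.mp hcon.2
    rw [List.prefix_iff_eq_take, show ("ext".toList).length = 3 from rfl, ← hZ, ← h1]

lemma pvBlock_asked (t : List Char) :
    pvChain pvTable ("asked".toList ++ t) = "ask".toList ++ pvChain pvTable t := by
  simp only [pvTable, pvChain_cons, pvChain_nil_pass]
  rw [pvRepl1_match "asked".toList "ask".toList _ (by decide)]
  rw [pvRepl1_blockOK "Asked".toList "Ask".toList "ask".toList _ (by decide)]
  rw [pvRepl1_blockOK "helped".toList "help".toList "ask".toList _ (by decide)]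
  rw [pvRepl1_blockOK "Helped".toList "Help".toList "ask".toList _ (by decide)]
  rw [pvRepl1_blockOK "worked".toList "work".toList "ask".toList _ (by decide)]
  rw [pvRepl1_blockOK "Worked".toList "Work".toList "ask".toList _ (by decide)]
  rw [pvRepl1_blockOK "found".toList "foun".toList "ask".toList _ (by decide)]
  rw [pvRepl1_blockOK "Found".toList "Foun".toList "ask".toList _ (by decide)]
  rw [pvRepl1_blockOK "first".toList "firs".toList "ask".toList _ (by decide)]
  rw [pvRepl1_blockOK "First".toList "Firs".toList "ask".toList _ (by decide)]
  rw [pvRepl1_blockOK "next".toList "nex".toList "ask".toList _ (by decide)]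
  rw [pvRepl1_blockOK "Next".toList "Nex".toList "ask".toList _ (by decide)]

lemma pvBlock_Asked (t : List Char) :
    pvChain pvTable ("Asked".toList ++ t) = "Ask".toList ++ pvChain pvTable t := by
  simp only [pvTable, pvChain_cons, pvChain_nil_pass]
  rw [pvRepl1_blockOK "asked".toList "ask".toList "Asked".toList _ (by decide)]
  rw [pvRepl1_match "Asked".toList "Ask".toList _ (by decide)]
  rw [pvRepl1_blockOK "helped".toList "help".toList "Ask".toList _ (by decide)]
  rw [pvRepl1_blockOK "Helped".toList "Help".toList "Ask".toList _ (by decide)]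
  rw [pvRepl1_blockOK "worked".toList "work".toList "Ask".toList _ (by decide)]
  rw [pvRepl1_blockOK "Worked".toList "Work".toList "Ask".toList _ (by decide)]
  rw [pvRepl1_blockOK "found".toList "foun".toList "Ask".toList _ (by decide)]
  rw [pvRepl1_blockOK "Found".toList "Foun".toList "Ask".toList _ (by decide)]
  rw [pvRepl1_blockOK "first".toList "firs".toList "Ask".toList _ (by decide)]
  rw [pvRepl1_blockOK "First".toList "Firs".toList "Ask".toList _ (by decide)]
  rw [pvRepl1_blockOK "next".toList "nex".toList "Ask".toList _ (by decide)]
  rw [pvRepl1_blockOK "Next".toList "Nex".toList "Ask".toList _ (by decide)]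

lemma pvBlock_helped (t : List Char) :
    pvChain pvTable ("helped".toList ++ t) = "help".toList ++ pvChain pvTable t := by
  simp only [pvTable, pvChain_cons, pvChain_nil_pass]
  rw [pvRepl1_blockOK "asked".toList "ask".toList "helped".toList _ (by decide)]
  rw [pvRepl1_blockOK "Asked".toList "Ask".toList "helped".toList _ (by decide)]
  rw [pvRepl1_match "helped".toList "help".toList _ (by decide)]
  rw [pvRepl1_blockOK "Helped".toList "Help".toList "help".toList _ (by decide)]
  rw [pvRepl1_blockOK "worked".toList "work".toList "help".toList _ (by decide)]
  rw [pvRepl1_blockOK "Worked".toList "Work".toList "help".toList _ (by decide)]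
  rw [pvRepl1_blockOK "found".toList "foun".toList "help".toList _ (by decide)]
  rw [pvRepl1_blockOK "Found".toList "Foun".toList "help".toList _ (by decide)]
  rw [pvRepl1_blockOK "first".toList "firs".toList "help".toList _ (by decide)]
  rw [pvRepl1_blockOK "First".toList "Firs".toList "help".toList _ (by decide)]
  rw [pvRepl1_blockOK "next".toList "nex".toList "help".toList _ (by decide)]
  rw [pvRepl1_blockOK "Next".toList "Nex".toList "help".toList _ (by decide)]

lemma pvBlock_Helped (t : List Char) :
    pvChain pvTable ("Helped".toList ++ t) = "Help".toList ++ pvChain pvTable t := by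
  simp only [pvTable, pvChain_cons, pvChain_nil_pass]
  rw [pvRepl1_blockOK "asked".toList "ask".toList "Helped".toList _ (by decide)]
  rw [pvRepl1_blockOK "Asked".toList "Ask".toList "Helped".toList _ (by decide)]
  rw [pvRepl1_blockOK "helped".toList "help".toList "Helped".toList _ (by decide)]
  rw [pvRepl1_match "Helped".toList "Help".toList _ (by decide)]
  rw [pvRepl1_blockOK "worked".toList "work".toList "Help".toList _ (by decide)]
  rw [pvRepl1_blockOK "Worked".toList "Work".toList "Help".toList _ (by decide)]
  rw [pvRepl1_blockOK "found".toList "foun".toList "Help".toList _ (by decide)]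
  rw [pvRepl1_blockOK "Found".toList "Foun".toList "Help".toList _ (by decide)]
  rw [pvRepl1_blockOK "first".toList "firs".toList "Help".toList _ (by decide)]
  rw [pvRepl1_blockOK "First".toList "Firs".toList "Help".toList _ (by decide)]
  rw [pvRepl1_blockOK "next".toList "nex".toList "Help".toList _ (by decide)]
  rw [pvRepl1_blockOK "Next".toList "Nex".toList "Help".toList _ (by decide)]

lemma pvBlock_worked (t : List Char) :
    pvChain pvTable ("worked".toList ++ t) = "work".toList ++ pvChain pvTable t := by
  simp only [pvTable, pvChain_cons, pvChain_nil_pass]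
  rw [pvRepl1_blockOK "asked".toList "ask".toList "worked".toList _ (by decide)]
  rw [pvRepl1_blockOK "Asked".toList "Ask".toList "worked".toList _ (by decide)]
  rw [pvRepl1_blockOK "helped".toList "help".toList "worked".toList _ (by decide)]
  rw [pvRepl1_blockOK "Helped".toList "Help".toList "worked".toList _ (by decide)]
  rw [pvRepl1_match "worked".toList "work".toList _ (by decide)]
  rw [pvRepl1_blockOK "Worked".toList "Work".toList "work".toList _ (by decide)]
  rw [pvRepl1_blockOK "found".toList "foun".toList "work".toList _ (by decide)]
  rw [pvRepl1_blockOK "Found".toList "Foun".toList "work".toList _ (by decide)]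
  rw [pvRepl1_blockOK "first".toList "firs".toList "work".toList _ (by decide)]
  rw [pvRepl1_blockOK "First".toList "Firs".toList "work".toList _ (by decide)]
  rw [pvRepl1_blockOK "next".toList "nex".toList "work".toList _ (by decide)]
  rw [pvRepl1_blockOK "Next".toList "Nex".toList "work".toList _ (by decide)]

lemma pvBlock_Worked (t : List Char) :
    pvChain pvTable ("Worked".toList ++ t) = "Work".toList ++ pvChain pvTable t := by
  simp only [pvTable, pvChain_cons, pvChain_nil_pass]
  rw [pvRepl1_blockOK "asked".toList "ask".toList "Worked".toList _ (by decide)]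
  rw [pvRepl1_blockOK "Asked".toList "Ask".toList "Worked".toList _ (by decide)]
  rw [pvRepl1_blockOK "helped".toList "help".toList "Worked".toList _ (by decide)]
  rw [pvRepl1_blockOK "Helped".toList "Help".toList "Worked".toList _ (by decide)]
  rw [pvRepl1_blockOK "worked".toList "work".toList "Worked".toList _ (by decide)]
  rw [pvRepl1_match "Worked".toList "Work".toList _ (by decide)]
  rw [pvRepl1_blockOK "found".toList "foun".toList "Work".toList _ (by decide)]
  rw [pvRepl1_blockOK "Found".toList "Foun".toList "Work".toList _ (by decide)]
  rw [pvRepl1_blockOK "first".toList "firs".toList "Work".toList _ (by decide)]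
  rw [pvRepl1_blockOK "First".toList "Firs".toList "Work".toList _ (by decide)]
  rw [pvRepl1_blockOK "next".toList "nex".toList "Work".toList _ (by decide)]
  rw [pvRepl1_blockOK "Next".toList "Nex".toList "Work".toList _ (by decide)]

lemma pvBlock_found (t : List Char)
    (hext : ¬ ("ext".toList <+: t)) :
    pvChain pvTable ("found".toList ++ t) = "foun".toList ++ pvChain pvTable t := by
  simp only [pvTable, pvChain_cons, pvChain_nil_pass]
  rw [pvRepl1_blockOK "asked".toList "ask".toList "found".toList _ (by decide)]
  rw [pvRepl1_blockOK "Asked".toList "Ask".toList "found".toList _ (by decide)]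
  rw [pvRepl1_blockOK "helped".toList "help".toList "found".toList _ (by decide)]
  rw [pvRepl1_blockOK "Helped".toList "Help".toList "found".toList _ (by decide)]
  rw [pvRepl1_blockOK "worked".toList "work".toList "found".toList _ (by decide)]
  rw [pvRepl1_blockOK "Worked".toList "Work".toList "found".toList _ (by decide)]
  rw [pvRepl1_match "found".toList "foun".toList _ (by decide)]
  rw [pvRepl1_blockOK "Found".toList "Foun".toList "foun".toList _ (by decide)]
  rw [pvRepl1_blockOK "first".toList "firs".toList "foun".toList _ (by decide)]
  rw [pvRepl1_blockOK "First".toList "Firs".toList "foun".toList _ (by decide)]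
  rw [pvNextStep "foun".toList _ t (by exact Or.inl rfl) (by
      rw [pvRepl1_take "First".toList "Firs".toList (by decide) _ 3 (by decide)]
      rw [pvRepl1_take "first".toList "firs".toList (by decide) _ 3 (by decide)]
      rw [pvRepl1_take "Found".toList "Foun".toList (by decide) _ 3 (by decide)]
      rw [pvRepl1_take "found".toList "foun".toList (by decide) _ 3 (by decide)]
      rw [pvRepl1_take "Worked".toList "Work".toList (by decide) _ 3 (by decide)]
      rw [pvRepl1_take "worked".toList "work".toList (by decide) _ 3 (by decide)]
      rw [pvRepl1_take "Helped".toList "Help".toList (by decide) _ 3 (by decide)]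
      rw [pvRepl1_take "helped".toList "help".toList (by decide) _ 3 (by decide)]
      rw [pvRepl1_take "Asked".toList "Ask".toList (by decide) _ 3 (by decide)]
      rw [pvRepl1_take "asked".toList "ask".toList (by decide) _ 3 (by decide)]) hext]
  rw [pvRepl1_blockOK "Next".toList "Nex".toList "foun".toList _ (by decide)]

lemma pvBlock_Found (t : List Char)
    (hext : ¬ ("ext".toList <+: t)) :
    pvChain pvTable ("Found".toList ++ t) = "Foun".toList ++ pvChain pvTable t := by
  simp only [pvTable, pvChain_cons, pvChain_nil_pass]
  rw [pvRepl1_blockOK "asked".toList "ask".toList "Found".toList _ (by decide)]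
  rw [pvRepl1_blockOK "Asked".toList "Ask".toList "Found".toList _ (by decide)]
  rw [pvRepl1_blockOK "helped".toList "help".toList "Found".toList _ (by decide)]
  rw [pvRepl1_blockOK "Helped".toList "Help".toList "Found".toList _ (by decide)]
  rw [pvRepl1_blockOK "worked".toList "work".toList "Found".toList _ (by decide)]
  rw [pvRepl1_blockOK "Worked".toList "Work".toList "Found".toList _ (by decide)]
  rw [pvRepl1_blockOK "found".toList "foun".toList "Found".toList _ (by decide)]
  rw [pvRepl1_match "Found".toList "Foun".toList _ (by decide)]
  rw [pvRepl1_blockOK "first".toList "firs".toList "Foun".toList _ (by decide)]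
  rw [pvRepl1_blockOK "First".toList "Firs".toList "Foun".toList _ (by decide)]
  rw [pvNextStep "Foun".toList _ t (by exact Or.inr rfl) (by
      rw [pvRepl1_take "First".toList "Firs".toList (by decide) _ 3 (by decide)]
      rw [pvRepl1_take "first".toList "firs".toList (by decide) _ 3 (by decide)]
      rw [pvRepl1_take "Found".toList "Foun".toList (by decide) _ 3 (by decide)]
      rw [pvRepl1_take "found".toList "foun".toList (by decide) _ 3 (by decide)]
      rw [pvRepl1_take "Worked".toList "Work".toList (by decide) _ 3 (by decide)]
      rw [pvRepl1_take "worked".toList "work".toList (by decide) _ 3 (by decide)]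
      rw [pvRepl1_take "Helped".toList "Help".toList (by decide) _ 3 (by decide)]
      rw [pvRepl1_take "helped".toList "help".toList (by decide) _ 3 (by decide)]
      rw [pvRepl1_take "Asked".toList "Ask".toList (by decide) _ 3 (by decide)]
      rw [pvRepl1_take "asked".toList "ask".toList (by decide) _ 3 (by decide)]) hext]
  rw [pvRepl1_blockOK "Next".toList "Nex".toList "Foun".toList _ (by decide)]

lemma pvBlock_first (t : List Char) :
    pvChain pvTable ("first".toList ++ t) = "firs".toList ++ pvChain pvTable t := by
  simp only [pvTable, pvChain_cons, pvChain_nil_pass]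
  rw [pvRepl1_blockOK "asked".toList "ask".toList "first".toList _ (by decide)]
  rw [pvRepl1_blockOK "Asked".toList "Ask".toList "first".toList _ (by decide)]
  rw [pvRepl1_blockOK "helped".toList "help".toList "first".toList _ (by decide)]
  rw [pvRepl1_blockOK "Helped".toList "Help".toList "first".toList _ (by decide)]
  rw [pvRepl1_blockOK "worked".toList "work".toList "first".toList _ (by decide)]
  rw [pvRepl1_blockOK "Worked".toList "Work".toList "first".toList _ (by decide)]
  rw [pvRepl1_blockOK "found".toList "foun".toList "first".toList _ (by decide)]
  rw [pvRepl1_blockOK "Found".toList "Foun".toList "first".toList _ (by decide)]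
  rw [pvRepl1_match "first".toList "firs".toList _ (by decide)]
  rw [pvRepl1_blockOK "First".toList "Firs".toList "firs".toList _ (by decide)]
  rw [pvRepl1_blockOK "next".toList "nex".toList "firs".toList _ (by decide)]
  rw [pvRepl1_blockOK "Next".toList "Nex".toList "firs".toList _ (by decide)]

lemma pvBlock_First (t : List Char) :
    pvChain pvTable ("First".toList ++ t) = "Firs".toList ++ pvChain pvTable t := by
  simp only [pvTable, pvChain_cons, pvChain_nil_pass]
  rw [pvRepl1_blockOK "asked".toList "ask".toList "First".toList _ (by decide)]
  rw [pvRepl1_blockOK "Asked".toList "Ask".toList "First".toList _ (by decide)]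
  rw [pvRepl1_blockOK "helped".toList "help".toList "First".toList _ (by decide)]
  rw [pvRepl1_blockOK "Helped".toList "Help".toList "First".toList _ (by decide)]
  rw [pvRepl1_blockOK "worked".toList "work".toList "First".toList _ (by decide)]
  rw [pvRepl1_blockOK "Worked".toList "Work".toList "First".toList _ (by decide)]
  rw [pvRepl1_blockOK "found".toList "foun".toList "First".toList _ (by decide)]
  rw [pvRepl1_blockOK "Found".toList "Foun".toList "First".toList _ (by decide)]
  rw [pvRepl1_blockOK "first".toList "firs".toList "First".toList _ (by decide)]
  rw [pvRepl1_match "First".toList "Firs".toList _ (by decide)]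
  rw [pvRepl1_blockOK "next".toList "nex".toList "Firs".toList _ (by decide)]
  rw [pvRepl1_blockOK "Next".toList "Nex".toList "Firs".toList _ (by decide)]

lemma pvBlock_next (t : List Char) :
    pvChain pvTable ("next".toList ++ t) = "nex".toList ++ pvChain pvTable t := by
  simp only [pvTable, pvChain_cons, pvChain_nil_pass]
  rw [pvRepl1_blockOK "asked".toList "ask".toList "next".toList _ (by decide)]
  rw [pvRepl1_blockOK "Asked".toList "Ask".toList "next".toList _ (by decide)]
  rw [pvRepl1_blockOK "helped".toList "help".toList "next".toList _ (by decide)]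
  rw [pvRepl1_blockOK "Helped".toList "Help".toList "next".toList _ (by decide)]
  rw [pvRepl1_blockOK "worked".toList "work".toList "next".toList _ (by decide)]
  rw [pvRepl1_blockOK "Worked".toList "Work".toList "next".toList _ (by decide)]
  rw [pvRepl1_blockOK "found".toList "foun".toList "next".toList _ (by decide)]
  rw [pvRepl1_blockOK "Found".toList "Foun".toList "next".toList _ (by decide)]
  rw [pvRepl1_blockOK "first".toList "firs".toList "next".toList _ (by decide)]
  rw [pvRepl1_blockOK "First".toList "Firs".toList "next".toList _ (by decide)]
  rw [pvRepl1_match "next".toList "nex".toList _ (by decide)]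
  rw [pvRepl1_blockOK "Next".toList "Nex".toList "nex".toList _ (by decide)]

lemma pvBlock_Next (t : List Char) :
    pvChain pvTable ("Next".toList ++ t) = "Nex".toList ++ pvChain pvTable t := by
  simp only [pvTable, pvChain_cons, pvChain_nil_pass]
  rw [pvRepl1_blockOK "asked".toList "ask".toList "Next".toList _ (by decide)]
  rw [pvRepl1_blockOK "Asked".toList "Ask".toList "Next".toList _ (by decide)]
  rw [pvRepl1_blockOK "helped".toList "help".toList "Next".toList _ (by decide)]
  rw [pvRepl1_blockOK "Helped".toList "Help".toList "Next".toList _ (by decide)]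
  rw [pvRepl1_blockOK "worked".toList "work".toList "Next".toList _ (by decide)]
  rw [pvRepl1_blockOK "Worked".toList "Work".toList "Next".toList _ (by decide)]
  rw [pvRepl1_blockOK "found".toList "foun".toList "Next".toList _ (by decide)]
  rw [pvRepl1_blockOK "Found".toList "Foun".toList "Next".toList _ (by decide)]
  rw [pvRepl1_blockOK "first".toList "firs".toList "Next".toList _ (by decide)]
  rw [pvRepl1_blockOK "First".toList "Firs".toList "Next".toList _ (by decide)]
  rw [pvRepl1_blockOK "next".toList "nex".toList "Next".toList _ (by decide)]
  rw [pvRepl1_match "Next".toList "Nex".toList _ (by decide)]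

-- A's side equals the pass chain over the table
lemma pvA_eq (text : String) :
    mutate_cluster_reduction text = String.ofList (pvChain pvTable text.toList) := by
  have hitems : (PySem.Dict.ofList [("asked", "ask"), ("helped", "help"), ("worked", "work"),
      ("found", "foun"), ("first", "firs"), ("next", "nex")] : PySem.Dict String String).items =
      [("asked", "ask"), ("helped", "help"), ("worked", "work"),
       ("found", "foun"), ("first", "firs"), ("next", "nex")] := by decide
  rw [mutate_cluster_reduction]
  simp only [hitems, List.foldl_cons, List.foldl_nil]
  simp only [PySem.Str.replace, String.toList_ofList,
    show pvCapitalize "asked" = "Asked" from by decide,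
    show pvCapitalize "ask" = "Ask" from by decide,
    show pvCapitalize "helped" = "Helped" from by decide,
    show pvCapitalize "help" = "Help" from by decide,
    show pvCapitalize "worked" = "Worked" from by decide,
    show pvCapitalize "work" = "Work" from by decide,
    show pvCapitalize "found" = "Found" from by decide,
    show pvCapitalize "foun" = "Foun" from by decide,
    show pvCapitalize "first" = "First" from by decide,
    show pvCapitalize "firs" = "Firs" from by decide,
    show pvCapitalize "next" = "Next" from by decide,
    show pvCapitalize "nex" = "Nex" from by decide]
  simp only [pvReplace_eq _ _ _ (by decide : ("asked".toList : List Char) ≠ []),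
    pvReplace_eq _ _ _ (by decide : ("Asked".toList : List Char) ≠ []),
    pvReplace_eq _ _ _ (by decide : ("helped".toList : List Char) ≠ []),
    pvReplace_eq _ _ _ (by decide : ("Helped".toList : List Char) ≠ []),
    pvReplace_eq _ _ _ (by decide : ("worked".toList : List Char) ≠ []),
    pvReplace_eq _ _ _ (by decide : ("Worked".toList : List Char) ≠ []),
    pvReplace_eq _ _ _ (by decide : ("found".toList : List Char) ≠ []),
    pvReplace_eq _ _ _ (by decide : ("Found".toList : List Char) ≠ []),
    pvReplace_eq _ _ _ (by decide : ("first".toList : List Char) ≠ []),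
    pvReplace_eq _ _ _ (by decide : ("First".toList : List Char) ≠ []),
    pvReplace_eq _ _ _ (by decide : ("next".toList : List Char) ≠ []),
    pvReplace_eq _ _ _ (by decide : ("Next".toList : List Char) ≠ [])]
  simp only [pvTable, pvChain_cons, pvChain_nil_pass]


-- B's skip counter jumps over characters
lemma pvScanGo_skip : ∀ (t : List Char) (skip : Nat), pvScanGo t skip = pvScanGo (t.drop skip) 0 := by
  intro t
  induction t with
  | nil => intro skip; cases skip <;> rfl
  | cons c t ih =>
      intro skip
      cases skip with
      | zero => rfl
      | succ m => rw [pvScanGo, ih m]; simp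

-- the main equivalence, by strong induction on the text
lemma pvMain : ∀ (n : Nat) (s : List Char), s.length ≤ n →
    ¬ ("foundext".toList <:+: s) → ¬ ("Foundext".toList <:+: s) →
    pvChain pvTable s = pvScanGo s 0 := by
  intro n
  induction n with
  | zero =>
      intro s hl _ _
      have h0 : s = [] := List.length_eq_zero_iff.mp (by omega)
      subst h0
      rw [pvChain_nil]
      rfl
  | succ n ih =>
      intro s hl hf1 hf2
      match s with
      | [] => rw [pvChain_nil]; rfl
      | c :: t =>
          rw [pvScanGo]
          cases hfind : pvPairs.find? (fun p => p.1.isPrefixOf (c :: t)) with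
          | none =>
              show pvChain pvTable (c :: t) = c :: pvScanGo t 0
              have hnom : ∀ p ∈ pvTable, ¬ p.1 <+: c :: t := by
                intro p hp hcon
                have h0 := List.find?_eq_none.mp hfind p (by rwa [pvPairs_eq_table])
                rw [List.isPrefixOf_iff_prefix] at h0
                exact h0 hcon
              rw [pvChain_cons_noMatch pvTable pvTable_valid c t hnom,
                ih t (by simp at hl ⊢; omega)
                  (fun h => hf1 (h.trans (List.suffix_cons c t).isInfix))
                  (fun h => hf2 (h.trans (List.suffix_cons c t).isInfix))]
          | some kv =>
              obtain ⟨k, v⟩ := kv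
              show pvChain pvTable (c :: t) = v ++ pvScanGo t (k.length - 1)
              have hmem : (k, v) ∈ pvTable := by
                rw [← pvPairs_eq_table]
                exact List.mem_of_find?_eq_some hfind
              have hkpre : k <+: c :: t := by
                have h0 := List.find?_some hfind
                simpa [List.isPrefixOf_iff_prefix] using h0
              obtain ⟨t', ht'⟩ := hkpre
              have hkne : k ≠ [] := by
                intro h
                have hs := pvValidB_spec (k, v) (pvTable_valid _ hmem)
                rw [h] at hs
                exact absurd hs.1 (by simp)
              have htt : t.drop (k.length - 1) = t' := by
                obtain ⟨d, k', rfl⟩ := List.exists_cons_of_ne_nil hkne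
                rw [List.cons_append, List.cons.injEq] at ht'
                rw [← ht'.2]
                simp
              have hlen := congrArg List.length ht'
              simp at hlen
              have hk1 : 0 < k.length := List.length_pos_iff.mpr hkne
              have hsuf : t' <:+ c :: t := ⟨k, ht'⟩
              have hIH := ih t' (by simp at hl; omega)
                (fun h => hf1 (h.trans hsuf.isInfix))
                (fun h => hf2 (h.trans hsuf.isInfix))
              rw [pvScanGo_skip, htt, ← hIH, ← ht']
              have hcases := hmem
              simp only [pvTable, List.mem_cons, List.not_mem_nil, or_false] at hcases
              rcases hcases with h | h | h | h | h | h | h | h | h | h | h | h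
              · obtain ⟨h1, h2⟩ := Prod.mk.inj h
                subst h1; subst h2
                exact pvBlock_asked t'
              · obtain ⟨h1, h2⟩ := Prod.mk.inj h
                subst h1; subst h2
                exact pvBlock_Asked t'
              · obtain ⟨h1, h2⟩ := Prod.mk.inj h
                subst h1; subst h2
                exact pvBlock_helped t'
              · obtain ⟨h1, h2⟩ := Prod.mk.inj h
                subst h1; subst h2
                exact pvBlock_Helped t'
              · obtain ⟨h1, h2⟩ := Prod.mk.inj h
                subst h1; subst h2
                exact pvBlock_worked t'
              · obtain ⟨h1, h2⟩ := Prod.mk.inj h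
                subst h1; subst h2
                exact pvBlock_Worked t'
              · obtain ⟨h1, h2⟩ := Prod.mk.inj h
                subst h1; subst h2
                refine pvBlock_found t' (fun hx => hf1 ?_)
                rw [← ht']
                obtain ⟨r, rfl⟩ := hx
                exact ⟨[], r, by simp⟩
              · obtain ⟨h1, h2⟩ := Prod.mk.inj h
                subst h1; subst h2
                refine pvBlock_Found t' (fun hx => hf2 ?_)
                rw [← ht']
                obtain ⟨r, rfl⟩ := hx
                exact ⟨[], r, by simp⟩
              · obtain ⟨h1, h2⟩ := Prod.mk.inj h
                subst h1; subst h2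
                exact pvBlock_first t'
              · obtain ⟨h1, h2⟩ := Prod.mk.inj h
                subst h1; subst h2
                exact pvBlock_First t'
              · obtain ⟨h1, h2⟩ := Prod.mk.inj h
                subst h1; subst h2
                exact pvBlock_next t'
              · obtain ⟨h1, h2⟩ := Prod.mk.inj h
                subst h1; subst h2
                exact pvBlock_Next t'

-- ===== tightness: A and B differ everywhere inside D_ (a length argument) =====

lemma pvNotPrefix_of_mayMatch (old w t : List Char) (h : pvMayMatch old w = false) :
    ¬ old <+: w ++ t :=
  fun hc => absurd (pvMayMatch_of_prefix hc) (by simp [h])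

-- no key of the table starts at a character outside pvHeads
lemma pvFind_none (c : Char) (t : List Char) (hc : c ∉ pvHeads) :
    pvPairs.find? (fun p => p.1.isPrefixOf (c :: t)) = none := by
  rw [List.find?_eq_none]
  intro p hp
  rw [pvPairs_eq_table] at hp
  obtain ⟨h4, _, _, _, hhd, _⟩ := pvValidB_spec p (pvTable_valid p hp)
  have hne : p.1 ≠ [] := by intro h; rw [h] at h4; exact absurd h4 (by decide)
  simp only [Bool.not_eq_true]
  rw [← Bool.not_eq_true, List.isPrefixOf_iff_prefix]
  intro hcon
  have hh := pvHead_of_prefix hcon hne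
  apply hc
  rw [show (c :: t).headD ' ' = c from rfl] at hh
  rw [hh]
  exact hhd

-- an occurrence of F in k ++ t' that can neither start at 0 nor inside k lies in t'
lemma pvInfix_shift' (F k t' : List Char) (hp0 : ¬ F <+: k ++ t')
    (h : ∀ p, 1 ≤ p → p < k.length → pvMayMatch F (k.drop p) = false) :
    F <:+: k ++ t' → F <:+: t' := by
  rintro ⟨pre, suf, heq⟩
  by_cases hlen : k.length ≤ pre.length
  · have hkpre : k <+: pre := by
      have h1 : k = (k ++ t').take k.length := by simp
      rw [← heq, List.append_assoc, List.take_append_of_le_length hlen] at h1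
      exact h1 ▸ List.take_prefix _ _
    obtain ⟨pre', rfl⟩ := hkpre
    have h2 : k ++ (pre' ++ (F ++ suf)) = k ++ t' := by
      rw [← heq]; simp
    refine ⟨pre', suf, ?_⟩
    rw [← List.append_cancel_left h2, List.append_assoc]
  · have hF : F <+: (k ++ t').drop pre.length := by
      rw [← heq, List.append_assoc, List.drop_left]
      exact List.prefix_append F suf
    by_cases hp : pre.length = 0
    · rw [hp, List.drop_zero] at hF
      exact absurd hF hp0
    · rw [List.drop_append_of_le_length (by omega)] at hF
      exact absurd (pvMayMatch_of_prefix hF)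
        (by simp [h pre.length (by omega) (by omega)])

lemma pvInfix_shift (F k t' : List Char) (hk : k ≠ [])
    (h : ∀ p, p < k.length → pvMayMatch F (k.drop p) = false) :
    F <:+: k ++ t' → F <:+: t' := by
  apply pvInfix_shift' F k t'
  · exact pvNotPrefix_of_mayMatch F k t'
      (by simpa using h 0 (List.length_pos_iff.mpr hk))
  · intro p hp1 hp2
    exact h p hp2

-- the D-condition, over character lists
def pvDL (s : List Char) : Prop :=
  "foundext".toList <:+: s ∨ "Foundext".toList <:+: s

lemma pvDL_tail (c : Char) (t : List Char)
    (hn : ¬ "found".toList <+: c :: t) (hN : ¬ "Found".toList <+: c :: t)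
    (hD : pvDL (c :: t)) : pvDL t := by
  have step : ∀ (F k : List Char), k <+: F → ¬ k <+: c :: t → F <:+: c :: t → F <:+: t := by
    rintro F k hkF hk ⟨pre, suf, heq⟩
    cases pre with
    | nil =>
        exact absurd (hkF.trans ⟨suf, by simpa using heq⟩) hk
    | cons c' pre' =>
        rw [List.cons_append, List.cons_append] at heq
        exact ⟨pre', suf, (List.cons.injEq _ _ _ _ ▸ heq).2⟩
  rcases hD with h | h
  · exact Or.inl (step _ "found".toList (by decide) hn h)
  · exact Or.inr (step _ "Found".toList (by decide) hN h)

lemma pvBlockChain_foundext (r : List Char) :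
    pvChain pvTable ("found".toList ++ ("ext".toList ++ r)) = "founex".toList ++ pvChain pvTable r := by
  have hre : "found".toList ++ ("ext".toList ++ r) = "foundext".toList ++ r := by
    rw [← List.append_assoc]
    exact congrArg (· ++ r) (by decide)
  have hsplit1 : ∀ X : List Char, "foundext".toList ++ X = "found".toList ++ ("ext".toList ++ X) := by
    intro X
    rw [← List.append_assoc]
    exact congrArg (· ++ X) (by decide)
  have hjoin1 : ∀ X : List Char, "foun".toList ++ ("ext".toList ++ X) = "founext".toList ++ X := by
    intro X
    rw [← List.append_assoc]
    exact congrArg (· ++ X) (by decide)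
  have hsplit2 : ∀ X : List Char, "founext".toList ++ X = "fou".toList ++ ("next".toList ++ X) := by
    intro X
    rw [← List.append_assoc]
    exact congrArg (· ++ X) (by decide)
  have hjoin2 : ∀ X : List Char, "fou".toList ++ ("nex".toList ++ X) = "founex".toList ++ X := by
    intro X
    rw [← List.append_assoc]
    exact congrArg (· ++ X) (by decide)
  rw [hre]
  simp only [pvTable, pvChain_cons, pvChain_nil_pass]
  rw [pvRepl1_blockOK "asked".toList "ask".toList "foundext".toList _ (by decide)]
  rw [pvRepl1_blockOK "Asked".toList "Ask".toList "foundext".toList _ (by decide)]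
  rw [pvRepl1_blockOK "helped".toList "help".toList "foundext".toList _ (by decide)]
  rw [pvRepl1_blockOK "Helped".toList "Help".toList "foundext".toList _ (by decide)]
  rw [pvRepl1_blockOK "worked".toList "work".toList "foundext".toList _ (by decide)]
  rw [pvRepl1_blockOK "Worked".toList "Work".toList "foundext".toList _ (by decide)]
  rw [hsplit1, pvRepl1_match "found".toList "foun".toList _ (by decide),
    pvRepl1_blockOK "found".toList "foun".toList "ext".toList _ (by decide), hjoin1]
  rw [pvRepl1_blockOK "Found".toList "Foun".toList "founext".toList _ (by decide)]
  rw [pvRepl1_blockOK "first".toList "firs".toList "founext".toList _ (by decide)]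
  rw [pvRepl1_blockOK "First".toList "Firs".toList "founext".toList _ (by decide)]
  rw [hsplit2, pvRepl1_blockOK "next".toList "nex".toList "fou".toList _ (by decide),
    pvRepl1_match "next".toList "nex".toList _ (by decide), hjoin2]
  rw [pvRepl1_blockOK "Next".toList "Nex".toList "founex".toList _ (by decide)]

lemma pvBlockChain_Foundext (r : List Char) :
    pvChain pvTable ("Found".toList ++ ("ext".toList ++ r)) = "Founex".toList ++ pvChain pvTable r := by
  have hre : "Found".toList ++ ("ext".toList ++ r) = "Foundext".toList ++ r := by
    rw [← List.append_assoc]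
    exact congrArg (· ++ r) (by decide)
  have hsplit1 : ∀ X : List Char, "Foundext".toList ++ X = "Found".toList ++ ("ext".toList ++ X) := by
    intro X
    rw [← List.append_assoc]
    exact congrArg (· ++ X) (by decide)
  have hjoin1 : ∀ X : List Char, "Foun".toList ++ ("ext".toList ++ X) = "Founext".toList ++ X := by
    intro X
    rw [← List.append_assoc]
    exact congrArg (· ++ X) (by decide)
  have hsplit2 : ∀ X : List Char, "Founext".toList ++ X = "Fou".toList ++ ("next".toList ++ X) := by
    intro X
    rw [← List.append_assoc]
    exact congrArg (· ++ X) (by decide)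
  have hjoin2 : ∀ X : List Char, "Fou".toList ++ ("nex".toList ++ X) = "Founex".toList ++ X := by
    intro X
    rw [← List.append_assoc]
    exact congrArg (· ++ X) (by decide)
  rw [hre]
  simp only [pvTable, pvChain_cons, pvChain_nil_pass]
  rw [pvRepl1_blockOK "asked".toList "ask".toList "Foundext".toList _ (by decide)]
  rw [pvRepl1_blockOK "Asked".toList "Ask".toList "Foundext".toList _ (by decide)]
  rw [pvRepl1_blockOK "helped".toList "help".toList "Foundext".toList _ (by decide)]
  rw [pvRepl1_blockOK "Helped".toList "Help".toList "Foundext".toList _ (by decide)]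
  rw [pvRepl1_blockOK "worked".toList "work".toList "Foundext".toList _ (by decide)]
  rw [pvRepl1_blockOK "Worked".toList "Work".toList "Foundext".toList _ (by decide)]
  rw [pvRepl1_blockOK "found".toList "foun".toList "Foundext".toList _ (by decide)]
  rw [hsplit1, pvRepl1_match "Found".toList "Foun".toList _ (by decide),
    pvRepl1_blockOK "Found".toList "Foun".toList "ext".toList _ (by decide), hjoin1]
  rw [pvRepl1_blockOK "first".toList "firs".toList "Founext".toList _ (by decide)]
  rw [pvRepl1_blockOK "First".toList "Firs".toList "Founext".toList _ (by decide)]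
  rw [hsplit2, pvRepl1_blockOK "next".toList "nex".toList "Fou".toList _ (by decide),
    pvRepl1_match "next".toList "nex".toList _ (by decide), hjoin2]
  rw [pvRepl1_blockOK "Next".toList "Nex".toList "Founex".toList _ (by decide)]

lemma pvScan_ext (r : List Char) :
    pvScanGo ("ext".toList ++ r) 0 = 'e' :: 'x' :: 't' :: pvScanGo r 0 := by
  show pvScanGo ('e' :: 'x' :: 't' :: r) 0 = _
  rw [pvScanGo, pvFind_none 'e' _ (by decide), pvScanGo, pvFind_none 'x' _ (by decide),
    pvScanGo, pvFind_none 't' _ (by decide)]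

-- A's result is never longer than B's, and strictly shorter inside D_
lemma pvMono : ∀ (n : Nat) (s : List Char), s.length ≤ n →
    (pvChain pvTable s).length ≤ (pvScanGo s 0).length ∧
      (pvDL s → (pvChain pvTable s).length < (pvScanGo s 0).length) := by
  intro n
  induction n with
  | zero =>
      intro s hl
      have h0 : s = [] := List.length_eq_zero_iff.mp (by omega)
      subst h0
      rw [pvChain_nil]
      refine ⟨by simp, fun hD => ?_⟩
      rcases hD with h | h <;> exact absurd (List.eq_nil_of_infix_nil h) (by decide)
  | succ n ih =>
      intro s hl
      match s with
      | [] =>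
          rw [pvChain_nil]
          refine ⟨by simp, fun hD => ?_⟩
          rcases hD with h | h <;> exact absurd (List.eq_nil_of_infix_nil h) (by decide)
      | c :: t =>
          cases hfind : pvPairs.find? (fun p => p.1.isPrefixOf (c :: t)) with
          | none =>
              have hnom : ∀ p ∈ pvTable, ¬ p.1 <+: c :: t := by
                intro p hp hcon
                have h0 := List.find?_eq_none.mp hfind p (by rwa [pvPairs_eq_table])
                rw [List.isPrefixOf_iff_prefix] at h0
                exact h0 hcon
              have hA : pvChain pvTable (c :: t) = c :: pvChain pvTable t :=
                pvChain_cons_noMatch pvTable pvTable_valid c t hnom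
              have hB : pvScanGo (c :: t) 0 = c :: pvScanGo t 0 := by
                rw [pvScanGo, hfind]
              have hIH := ih t (by simp at hl; omega)
              constructor
              · rw [hA, hB]
                simpa using hIH.1
              · intro hD
                rw [hA, hB]
                have hD' : pvDL t :=
                  pvDL_tail c t (hnom ("found".toList, "foun".toList) (by decide))
                    (hnom ("Found".toList, "Foun".toList) (by decide)) hD
                simpa using hIH.2 hD'
          | some kv =>
              obtain ⟨k, v⟩ := kv
              have hmem : (k, v) ∈ pvTable := by
                rw [← pvPairs_eq_table]
                exact List.mem_of_find?_eq_some hfind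
              have hkpre : k <+: c :: t := by
                have h0 := List.find?_some hfind
                simpa [List.isPrefixOf_iff_prefix] using h0
              obtain ⟨t', ht'⟩ := hkpre
              have hkne : k ≠ [] := by
                intro h
                have hs := pvValidB_spec (k, v) (pvTable_valid _ hmem)
                rw [h] at hs
                exact absurd hs.1 (by simp)
              have htt : t.drop (k.length - 1) = t' := by
                obtain ⟨d, k', rfl⟩ := List.exists_cons_of_ne_nil hkne
                rw [List.cons_append, List.cons.injEq] at ht'
                rw [← ht'.2]
                simp
              have hB : pvScanGo (c :: t) 0 = v ++ pvScanGo t' 0 := by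
                rw [pvScanGo, hfind]
                show v ++ pvScanGo t (k.length - 1) = v ++ pvScanGo t' 0
                rw [pvScanGo_skip, htt]
              have hcases := hmem
              simp only [pvTable, List.mem_cons, List.not_mem_nil, or_false] at hcases
              rcases hcases with h | h | h | h | h | h | h | h | h | h | h | h
              · obtain ⟨h1, h2⟩ := Prod.mk.inj h
                subst h1; subst h2
                have hA : pvChain pvTable (c :: t) = "ask".toList ++ pvChain pvTable t' := by
                  rw [← ht']
                  exact pvBlock_asked t'
                have hshift : pvDL (c :: t) → pvDL t' := by
                  intro hD
                  rw [← ht'] at hD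
                  rcases hD with h | h
                  · exact Or.inl (pvInfix_shift _ _ t' (by decide) (by decide) h)
                  · exact Or.inr (pvInfix_shift _ _ t' (by decide) (by decide) h)
                have hIH := ih t' (by
                  have := congrArg List.length ht'
                  simp at this hl ⊢
                  omega)
                constructor
                · rw [hA, hB]
                  simp only [List.length_append]
                  have := hIH.1
                  omega
                · intro hD
                  rw [hA, hB]
                  simp only [List.length_append]
                  have := hIH.2 (hshift hD)
                  omega
              · obtain ⟨h1, h2⟩ := Prod.mk.inj h
                subst h1; subst h2
                have hA : pvChain pvTable (c :: t) = "Ask".toList ++ pvChain pvTable t' := by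
                  rw [← ht']
                  exact pvBlock_Asked t'
                have hshift : pvDL (c :: t) → pvDL t' := by
                  intro hD
                  rw [← ht'] at hD
                  rcases hD with h | h
                  · exact Or.inl (pvInfix_shift _ _ t' (by decide) (by decide) h)
                  · exact Or.inr (pvInfix_shift _ _ t' (by decide) (by decide) h)
                have hIH := ih t' (by
                  have := congrArg List.length ht'
                  simp at this hl ⊢
                  omega)
                constructor
                · rw [hA, hB]
                  simp only [List.length_append]
                  have := hIH.1
                  omega
                · intro hD
                  rw [hA, hB]
                  simp only [List.length_append]
                  have := hIH.2 (hshift hD)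
                  omega
              · obtain ⟨h1, h2⟩ := Prod.mk.inj h
                subst h1; subst h2
                have hA : pvChain pvTable (c :: t) = "help".toList ++ pvChain pvTable t' := by
                  rw [← ht']
                  exact pvBlock_helped t'
                have hshift : pvDL (c :: t) → pvDL t' := by
                  intro hD
                  rw [← ht'] at hD
                  rcases hD with h | h
                  · exact Or.inl (pvInfix_shift _ _ t' (by decide) (by decide) h)
                  · exact Or.inr (pvInfix_shift _ _ t' (by decide) (by decide) h)
                have hIH := ih t' (by
                  have := congrArg List.length ht'
                  simp at this hl ⊢
                  omega)
                constructor
                · rw [hA, hB]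
                  simp only [List.length_append]
                  have := hIH.1
                  omega
                · intro hD
                  rw [hA, hB]
                  simp only [List.length_append]
                  have := hIH.2 (hshift hD)
                  omega
              · obtain ⟨h1, h2⟩ := Prod.mk.inj h
                subst h1; subst h2
                have hA : pvChain pvTable (c :: t) = "Help".toList ++ pvChain pvTable t' := by
                  rw [← ht']
                  exact pvBlock_Helped t'
                have hshift : pvDL (c :: t) → pvDL t' := by
                  intro hD
                  rw [← ht'] at hD
                  rcases hD with h | h
                  · exact Or.inl (pvInfix_shift _ _ t' (by decide) (by decide) h)
                  · exact Or.inr (pvInfix_shift _ _ t' (by decide) (by decide) h)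
                have hIH := ih t' (by
                  have := congrArg List.length ht'
                  simp at this hl ⊢
                  omega)
                constructor
                · rw [hA, hB]
                  simp only [List.length_append]
                  have := hIH.1
                  omega
                · intro hD
                  rw [hA, hB]
                  simp only [List.length_append]
                  have := hIH.2 (hshift hD)
                  omega
              · obtain ⟨h1, h2⟩ := Prod.mk.inj h
                subst h1; subst h2
                have hA : pvChain pvTable (c :: t) = "work".toList ++ pvChain pvTable t' := by
                  rw [← ht']
                  exact pvBlock_worked t'
                have hshift : pvDL (c :: t) → pvDL t' := by
                  intro hD
                  rw [← ht'] at hD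
                  rcases hD with h | h
                  · exact Or.inl (pvInfix_shift _ _ t' (by decide) (by decide) h)
                  · exact Or.inr (pvInfix_shift _ _ t' (by decide) (by decide) h)
                have hIH := ih t' (by
                  have := congrArg List.length ht'
                  simp at this hl ⊢
                  omega)
                constructor
                · rw [hA, hB]
                  simp only [List.length_append]
                  have := hIH.1
                  omega
                · intro hD
                  rw [hA, hB]
                  simp only [List.length_append]
                  have := hIH.2 (hshift hD)
                  omega
              · obtain ⟨h1, h2⟩ := Prod.mk.inj h
                subst h1; subst h2
                have hA : pvChain pvTable (c :: t) = "Work".toList ++ pvChain pvTable t' := by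
                  rw [← ht']
                  exact pvBlock_Worked t'
                have hshift : pvDL (c :: t) → pvDL t' := by
                  intro hD
                  rw [← ht'] at hD
                  rcases hD with h | h
                  · exact Or.inl (pvInfix_shift _ _ t' (by decide) (by decide) h)
                  · exact Or.inr (pvInfix_shift _ _ t' (by decide) (by decide) h)
                have hIH := ih t' (by
                  have := congrArg List.length ht'
                  simp at this hl ⊢
                  omega)
                constructor
                · rw [hA, hB]
                  simp only [List.length_append]
                  have := hIH.1
                  omega
                · intro hD
                  rw [hA, hB]
                  simp only [List.length_append]
                  have := hIH.2 (hshift hD)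
                  omega
              · obtain ⟨h1, h2⟩ := Prod.mk.inj h
                subst h1; subst h2
                by_cases hext : "ext".toList <+: t'
                · obtain ⟨r, rfl⟩ := hext
                  have hA : pvChain pvTable (c :: t) = "founex".toList ++ pvChain pvTable r := by
                    rw [← ht']
                    exact pvBlockChain_foundext r
                  have hB2 : pvScanGo (c :: t) 0 = "foun".toList ++ ('e' :: 'x' :: 't' :: pvScanGo r 0) := by
                    rw [hB, pvScan_ext]
                  have hIH := ih r (by
                    have := congrArg List.length ht'
                    simp at this hl ⊢
                    omega)
                  constructor
                  · rw [hA, hB2]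
                    simp only [List.length_append, List.length_cons]
                    have := hIH.1
                    simp
                    omega
                  · intro _
                    rw [hA, hB2]
                    simp only [List.length_append, List.length_cons]
                    have := hIH.1
                    simp
                    omega
                · have hA : pvChain pvTable (c :: t) = "foun".toList ++ pvChain pvTable t' := by
                    rw [← ht']
                    exact pvBlock_found t' hext
                  have hshift : pvDL (c :: t) → pvDL t' := by
                    intro hD
                    rw [← ht'] at hD
                    rcases hD with h | h
                    · exact Or.inl (pvInfix_shift' _ _ t' (fun hc => hext (by
                        have hc2 : "found".toList ++ "ext".toList <+: "found".toList ++ t' := by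
                          rw [show "found".toList ++ "ext".toList = "foundext".toList from by decide]
                          exact hc
                        obtain ⟨r0, hr⟩ := hc2
                        rw [List.append_assoc] at hr
                        exact ⟨r0, List.append_cancel_left hr⟩)) (by decide) h)
                    · exact Or.inr (pvInfix_shift _ _ t' (by decide) (by decide) h)
                  have hIH := ih t' (by
                    have := congrArg List.length ht'
                    simp at this hl ⊢
                    omega)
                  constructor
                  · rw [hA, hB]
                    simp only [List.length_append]
                    have := hIH.1
                    omega
                  · intro hD
                    rw [hA, hB]
                    simp only [List.length_append]
                    have := hIH.2 (hshift hD)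
                    omega
              · obtain ⟨h1, h2⟩ := Prod.mk.inj h
                subst h1; subst h2
                by_cases hext : "ext".toList <+: t'
                · obtain ⟨r, rfl⟩ := hext
                  have hA : pvChain pvTable (c :: t) = "Founex".toList ++ pvChain pvTable r := by
                    rw [← ht']
                    exact pvBlockChain_Foundext r
                  have hB2 : pvScanGo (c :: t) 0 = "Foun".toList ++ ('e' :: 'x' :: 't' :: pvScanGo r 0) := by
                    rw [hB, pvScan_ext]
                  have hIH := ih r (by
                    have := congrArg List.length ht'
                    simp at this hl ⊢
                    omega)
                  constructor
                  · rw [hA, hB2]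
                    simp only [List.length_append, List.length_cons]
                    have := hIH.1
                    simp
                    omega
                  · intro _
                    rw [hA, hB2]
                    simp only [List.length_append, List.length_cons]
                    have := hIH.1
                    simp
                    omega
                · have hA : pvChain pvTable (c :: t) = "Foun".toList ++ pvChain pvTable t' := by
                    rw [← ht']
                    exact pvBlock_Found t' hext
                  have hshift : pvDL (c :: t) → pvDL t' := by
                    intro hD
                    rw [← ht'] at hD
                    rcases hD with h | h
                    · exact Or.inl (pvInfix_shift _ _ t' (by decide) (by decide) h)
                    · exact Or.inr (pvInfix_shift' _ _ t' (fun hc => hext (by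
                        have hc2 : "Found".toList ++ "ext".toList <+: "Found".toList ++ t' := by
                          rw [show "Found".toList ++ "ext".toList = "Foundext".toList from by decide]
                          exact hc
                        obtain ⟨r0, hr⟩ := hc2
                        rw [List.append_assoc] at hr
                        exact ⟨r0, List.append_cancel_left hr⟩)) (by decide) h)
                  have hIH := ih t' (by
                    have := congrArg List.length ht'
                    simp at this hl ⊢
                    omega)
                  constructor
                  · rw [hA, hB]
                    simp only [List.length_append]
                    have := hIH.1
                    omega
                  · intro hD
                    rw [hA, hB]
                    simp only [List.length_append]
                    have := hIH.2 (hshift hD)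
                    omega
              · obtain ⟨h1, h2⟩ := Prod.mk.inj h
                subst h1; subst h2
                have hA : pvChain pvTable (c :: t) = "firs".toList ++ pvChain pvTable t' := by
                  rw [← ht']
                  exact pvBlock_first t'
                have hshift : pvDL (c :: t) → pvDL t' := by
                  intro hD
                  rw [← ht'] at hD
                  rcases hD with h | h
                  · exact Or.inl (pvInfix_shift _ _ t' (by decide) (by decide) h)
                  · exact Or.inr (pvInfix_shift _ _ t' (by decide) (by decide) h)
                have hIH := ih t' (by
                  have := congrArg List.length ht'
                  simp at this hl ⊢
                  omega)
                constructor
                · rw [hA, hB]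
                  simp only [List.length_append]
                  have := hIH.1
                  omega
                · intro hD
                  rw [hA, hB]
                  simp only [List.length_append]
                  have := hIH.2 (hshift hD)
                  omega
              · obtain ⟨h1, h2⟩ := Prod.mk.inj h
                subst h1; subst h2
                have hA : pvChain pvTable (c :: t) = "Firs".toList ++ pvChain pvTable t' := by
                  rw [← ht']
                  exact pvBlock_First t'
                have hshift : pvDL (c :: t) → pvDL t' := by
                  intro hD
                  rw [← ht'] at hD
                  rcases hD with h | h
                  · exact Or.inl (pvInfix_shift _ _ t' (by decide) (by decide) h)
                  · exact Or.inr (pvInfix_shift _ _ t' (by decide) (by decide) h)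
                have hIH := ih t' (by
                  have := congrArg List.length ht'
                  simp at this hl ⊢
                  omega)
                constructor
                · rw [hA, hB]
                  simp only [List.length_append]
                  have := hIH.1
                  omega
                · intro hD
                  rw [hA, hB]
                  simp only [List.length_append]
                  have := hIH.2 (hshift hD)
                  omega
              · obtain ⟨h1, h2⟩ := Prod.mk.inj h
                subst h1; subst h2
                have hA : pvChain pvTable (c :: t) = "nex".toList ++ pvChain pvTable t' := by
                  rw [← ht']
                  exact pvBlock_next t'
                have hshift : pvDL (c :: t) → pvDL t' := by
                  intro hD
                  rw [← ht'] at hD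
                  rcases hD with h | h
                  · exact Or.inl (pvInfix_shift _ _ t' (by decide) (by decide) h)
                  · exact Or.inr (pvInfix_shift _ _ t' (by decide) (by decide) h)
                have hIH := ih t' (by
                  have := congrArg List.length ht'
                  simp at this hl ⊢
                  omega)
                constructor
                · rw [hA, hB]
                  simp only [List.length_append]
                  have := hIH.1
                  omega
                · intro hD
                  rw [hA, hB]
                  simp only [List.length_append]
                  have := hIH.2 (hshift hD)
                  omega
              · obtain ⟨h1, h2⟩ := Prod.mk.inj h
                subst h1; subst h2
                have hA : pvChain pvTable (c :: t) = "Nex".toList ++ pvChain pvTable t' := by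
                  rw [← ht']
                  exact pvBlock_Next t'
                have hshift : pvDL (c :: t) → pvDL t' := by
                  intro hD
                  rw [← ht'] at hD
                  rcases hD with h | h
                  · exact Or.inl (pvInfix_shift _ _ t' (by decide) (by decide) h)
                  · exact Or.inr (pvInfix_shift _ _ t' (by decide) (by decide) h)
                have hIH := ih t' (by
                  have := congrArg List.length ht'
                  simp at this hl ⊢
                  omega)
                constructor
                · rw [hA, hB]
                  simp only [List.length_append]
                  have := hIH.1
                  omega
                · intro hD
                  rw [hA, hB]
                  simp only [List.length_append]
                  have := hIH.2 (hshift hD)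
                  omega

-- ===== VERDICT =====
theorem mutate_cluster_reduction_spec : Claim_unchanged_mutate_cluster_reduction := by
  intro text _ hnD
  rw [D_mutate_cluster_reduction] at hnD
  push Not at hnD
  rw [pvA_eq, mutate_cluster_reduction_alt]
  congr 1
  apply pvMain text.toList.length text.toList le_rfl
  · intro h
    exact hnD.1 ((PySem.Str.isIn_iff_infix _ _).mpr h)
  · intro h
    exact hnD.2 ((PySem.Str.isIn_iff_infix _ _).mpr h)
theorem mutate_cluster_reduction_tight : Claim_exact_mutate_cluster_reduction := by
  intro text _ hD heq
  have hA := pvA_eq text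
  have hB : mutate_cluster_reduction_alt text = String.ofList (pvScanGo text.toList 0) := rfl
  rw [hA, hB] at heq
  have hlist := congrArg String.toList heq
  simp only [String.toList_ofList] at hlist
  have hlen := congrArg List.length hlist
  have hDL : pvDL text.toList := by
    rcases hD with h | h
    · exact Or.inl ((PySem.Str.isIn_iff_infix _ _).mp h)
    · exact Or.inr ((PySem.Str.isIn_iff_infix _ _).mp h)
  have hlt := (pvMono text.toList.length text.toList le_rfl).2 hDL
  omega

set_option maxRecDepth 100000 in
theorem mutate_cluster_reduction_changed : Claim_changed_mutate_cluster_reduction := by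
  unfold Claim_changed_mutate_cluster_reduction; decide
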